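-- pv_equiv track=rewrite | github.com/Alex-Pennington/LogSplitter_Controller | lcars_docs_server.py | _get_document_priority
-- ===== SOURCE A (Python) =====
-- def _get_document_priority(filename, content):
--     """Assign priority for emergency access (lower number = higher priority)"""
--     filename_lower = filename.lower()
--
--     # Emergency/Safety docs get highest priority
--     if any(keyword in filename_lower for keyword in ['error', 'emergency', 'safety', 'mill_lamp', 'system_test']):
--         return 1
--     # Hardware troubleshooting
--     elif any(keyword in filename_lower for keyword in ['pin', 'pressure', 'hardware', 'arduino']):
--         return 2
--     # Operations and commands
--     elif any(keyword in filename_lower for keyword in ['setup', 'command', 'deploy']):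
--         return 3
--     # General documentation
--     else:
--         return 4
-- ===== SOURCE B (Python) =====
-- _PATTERNS = (
--     ('error', 1), ('emergency', 1), ('safety', 1), ('mill_lamp', 1), ('system_test', 1),
--     ('pin', 2), ('pressure', 2), ('hardware', 2), ('arduino', 2),
--     ('setup', 3), ('command', 3), ('deploy', 3),
-- )
--
-- def _get_document_priority(filename, content):
--     """Assign priority for emergency access (lower number = higher priority)"""
--     fl = filename.lower()
--     best = 4
--     for i in range(len(fl)):
--         for kw, p in _PATTERNS:
--             if fl.startswith(kw, i):
--                 best = min(best, p)
--     return best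
-- ===== Notes on version B (the rewrite author's own statement) =====
-- stated objective: alternative
-- what changed: Replaced A's staged any(keyword in filename) substring-containment tests by a naive multi-pattern text scan: one pass over every position of the lowercased filename checking startswith for each keyword and keeping the minimum matched priority (default 4).
import Mathlib
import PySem

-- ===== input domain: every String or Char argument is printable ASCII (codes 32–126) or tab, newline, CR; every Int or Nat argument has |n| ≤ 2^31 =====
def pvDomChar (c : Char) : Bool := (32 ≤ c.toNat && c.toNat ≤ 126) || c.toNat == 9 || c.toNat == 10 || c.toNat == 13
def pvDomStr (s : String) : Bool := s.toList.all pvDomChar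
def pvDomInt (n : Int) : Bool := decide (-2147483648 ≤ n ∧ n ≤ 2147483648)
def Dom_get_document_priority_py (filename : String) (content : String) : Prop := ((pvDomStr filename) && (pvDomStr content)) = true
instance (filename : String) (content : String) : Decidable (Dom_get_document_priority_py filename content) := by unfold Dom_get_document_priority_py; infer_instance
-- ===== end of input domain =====

-- B replaces A's staged any(keyword in filename) containment tests by a naive multi-pattern
-- position scan (startswith at each index, min-priority accumulator); objective: alternative.
-- content is unused in both programs.

-- ===== PORT A =====
def get_document_priority_py (filename : String) (content : String) : Int :=
  let filename_lower := PySem.Str.lower filename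
  if (["error", "emergency", "safety", "mill_lamp", "system_test"].any
      (fun kw => PySem.Str.isIn kw filename_lower)) then 1
  else if (["pin", "pressure", "hardware", "arduino"].any
      (fun kw => PySem.Str.isIn kw filename_lower)) then 2
  else if (["setup", "command", "deploy"].any
      (fun kw => PySem.Str.isIn kw filename_lower)) then 3
  else 4

-- ===== PORT B =====
-- the module-level tuple _PATTERNS, in order
def pvPatterns : List (String × Int) :=
  [("error", 1), ("emergency", 1), ("safety", 1), ("mill_lamp", 1), ("system_test", 1),
   ("pin", 2), ("pressure", 2), ("hardware", 2), ("arduino", 2),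
   ("setup", 3), ("command", 3), ("deploy", 3)]

-- fl.startswith(kw, i): exact for 0 ≤ i (all loop indices here are range(len(fl)) indices)
def pvStartsAt (fl : String) (kw : String) (i : Int) : Bool :=
  PySem.Chars.startswith (fl.toList.drop i.toNat) kw.toList

def get_document_priority_py_alt (filename : String) (content : String) : Int :=
  let fl := PySem.Str.lower filename
  (PySem.List.pyRange 0 (PySem.Str.len fl) 1).foldl
    (fun best i =>
      pvPatterns.foldl
        (fun best kp => if pvStartsAt fl kp.1 i then min best kp.2 else best)
        best)
    4

-- ===== PRECONDITION & SPEC =====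
def Spec_get_document_priority_py (filename : String) (content : String) (out : Int) : Prop := out = get_document_priority_py_alt filename content
instance (filename : String) (content : String) (out : Int) : Decidable (Spec_get_document_priority_py filename content out) := by unfold Spec_get_document_priority_py; infer_instance

-- ===== CLAIM (what is proved, stated in full; the proofs are below) =====
def Claim_equal_get_document_priority_py : Prop := ∀ (filename : String) (content : String), Dom_get_document_priority_py filename content → Spec_get_document_priority_py filename content (get_document_priority_py filename content)

-- ===== LEMMAS AND PROOFS =====

-- the three tier conditions at a single position i
def pvD1 (fl : String) (i : Int) : Bool :=
  pvStartsAt fl "error" i || pvStartsAt fl "emergency" i || pvStartsAt fl "safety" i ||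
  pvStartsAt fl "mill_lamp" i || pvStartsAt fl "system_test" i
def pvD2 (fl : String) (i : Int) : Bool :=
  pvStartsAt fl "pin" i || pvStartsAt fl "pressure" i || pvStartsAt fl "hardware" i ||
  pvStartsAt fl "arduino" i
def pvD3 (fl : String) (i : Int) : Bool :=
  pvStartsAt fl "setup" i || pvStartsAt fl "command" i || pvStartsAt fl "deploy" i

-- the accumulator only ever takes one of four values
def pvOk (b : Int) : Prop := b = 1 ∨ b = 2 ∨ b = 3 ∨ b = 4

-- the canonical 3-if form of one full pass over pvPatterns starting from b
def pvForm (d1 d2 d3 : Bool) (b : Int) : Int :=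
  if d1 then min b 1 else if d2 then min b 2 else if d3 then min b 3 else b

theorem pvForm_ok (d1 d2 d3 : Bool) (b : Int) (hb : pvOk b) : pvOk (pvForm d1 d2 d3 b) := by
  rcases hb with rfl | rfl | rfl | rfl <;> cases d1 <;> cases d2 <;> cases d3 <;> unfold pvOk pvForm <;> decide

-- abstract one-tier chains (booleans abstracted so every leaf decides)
theorem pv_chainA5 (s1 s2 s3 s4 s5 : Bool) (b : Int) (hb : pvOk b) :
    (if s5 then min (if s4 then min (if s3 then min (if s2 then min (if s1 then min b 1 else b) 1
        else if s1 then min b 1 else b) 1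
        else if s2 then min (if s1 then min b 1 else b) 1 else if s1 then min b 1 else b) 1
        else if s3 then min (if s2 then min (if s1 then min b 1 else b) 1
        else if s1 then min b 1 else b) 1
        else if s2 then min (if s1 then min b 1 else b) 1 else if s1 then min b 1 else b) 1
      else if s4 then min (if s3 then min (if s2 then min (if s1 then min b 1 else b) 1
        else if s1 then min b 1 else b) 1
        else if s2 then min (if s1 then min b 1 else b) 1 else if s1 then min b 1 else b) 1
        else if s3 then min (if s2 then min (if s1 then min b 1 else b) 1
        else if s1 then min b 1 else b) 1
        else if s2 then min (if s1 then min b 1 else b) 1 else if s1 then min b 1 else b)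
      = if s1 || s2 || s3 || s4 || s5 then min b 1 else b := by
  rcases hb with rfl | rfl | rfl | rfl <;>
  cases s1 <;> cases s2 <;> cases s3 <;> cases s4 <;> cases s5 <;> decide

theorem pv_chainB4 (s1 s2 s3 s4 : Bool) (b : Int) (hb : pvOk b) :
    (if s4 then min (if s3 then min (if s2 then min (if s1 then min b 2 else b) 2
        else if s1 then min b 2 else b) 2
        else if s2 then min (if s1 then min b 2 else b) 2 else if s1 then min b 2 else b) 2
      else if s3 then min (if s2 then min (if s1 then min b 2 else b) 2
        else if s1 then min b 2 else b) 2
        else if s2 then min (if s1 then min b 2 else b) 2 else if s1 then min b 2 else b)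
      = if s1 || s2 || s3 || s4 then min b 2 else b := by
  rcases hb with rfl | rfl | rfl | rfl <;>
  cases s1 <;> cases s2 <;> cases s3 <;> cases s4 <;> decide

theorem pv_chainC3 (s1 s2 s3 : Bool) (b : Int) (hb : pvOk b) :
    (if s3 then min (if s2 then min (if s1 then min b 3 else b) 3
        else if s1 then min b 3 else b) 3
      else if s2 then min (if s1 then min b 3 else b) 3 else if s1 then min b 3 else b)
      = if s1 || s2 || s3 then min b 3 else b := by
  rcases hb with rfl | rfl | rfl | rfl <;> cases s1 <;> cases s2 <;> cases s3 <;> decide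

-- the three tier passes over pvPatterns (chain lemmas transported by definitional unfolding)
theorem pv_chain1 (fl : String) (i : Int) (b : Int) (hb : pvOk b) :
    ([("error", (1:Int)), ("emergency", 1), ("safety", 1), ("mill_lamp", 1), ("system_test", 1)]).foldl
        (fun best kp => if pvStartsAt fl kp.1 i then min best kp.2 else best) b
      = if pvD1 fl i then min b 1 else b :=
  pv_chainA5 (pvStartsAt fl "error" i) (pvStartsAt fl "emergency" i) (pvStartsAt fl "safety" i)
    (pvStartsAt fl "mill_lamp" i) (pvStartsAt fl "system_test" i) b hb

theorem pv_chain2 (fl : String) (i : Int) (b : Int) (hb : pvOk b) :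
    ([("pin", (2:Int)), ("pressure", 2), ("hardware", 2), ("arduino", 2)]).foldl
        (fun best kp => if pvStartsAt fl kp.1 i then min best kp.2 else best) b
      = if pvD2 fl i then min b 2 else b :=
  pv_chainB4 (pvStartsAt fl "pin" i) (pvStartsAt fl "pressure" i) (pvStartsAt fl "hardware" i)
    (pvStartsAt fl "arduino" i) b hb

theorem pv_chain3 (fl : String) (i : Int) (b : Int) (hb : pvOk b) :
    ([("setup", (3:Int)), ("command", 3), ("deploy", 3)]).foldl
        (fun best kp => if pvStartsAt fl kp.1 i then min best kp.2 else best) b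
      = if pvD3 fl i then min b 3 else b :=
  pv_chainC3 (pvStartsAt fl "setup" i) (pvStartsAt fl "command" i) (pvStartsAt fl "deploy" i) b hb

-- merging the three tier passes into pvForm
theorem pv_merge3 (d1 d2 d3 : Bool) (b : Int) (hb : pvOk b) :
    (if d3 then min (if d2 then min (if d1 then min b 1 else b) 2 else if d1 then min b 1 else b) 3
      else if d2 then min (if d1 then min b 1 else b) 2 else if d1 then min b 1 else b)
      = pvForm d1 d2 d3 b := by
  rcases hb with rfl | rfl | rfl | rfl <;> cases d1 <;> cases d2 <;> cases d3 <;> decide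

-- one inner pass over pvPatterns, characterized by the three tier booleans
theorem pv_inner_eq (fl : String) (i : Int) (b : Int) (hb : pvOk b) :
    pvPatterns.foldl (fun best kp => if pvStartsAt fl kp.1 i then min best kp.2 else best) b
      = pvForm (pvD1 fl i) (pvD2 fl i) (pvD3 fl i) b := by
  have hb1 : pvOk (if pvD1 fl i then min b 1 else b) := by
    by_cases h : pvD1 fl i = true
    · rw [if_pos h]; rcases hb with rfl | rfl | rfl | rfl <;> unfold pvOk <;> decide
    · rw [if_neg h]; exact hb
  have hb2 : pvOk (if pvD2 fl i then min (if pvD1 fl i then min b 1 else b) 2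
      else if pvD1 fl i then min b 1 else b) := by
    by_cases h : pvD2 fl i = true
    · rw [if_pos h]; rcases hb1 with h1 | h1 | h1 | h1 <;> rw [h1] <;> unfold pvOk <;> decide
    · rw [if_neg h]; exact hb1
  have e : pvPatterns.foldl
        (fun best kp => if pvStartsAt fl kp.1 i then min best kp.2 else best) b
      = ([("setup", (3:Int)), ("command", 3), ("deploy", 3)]).foldl
          (fun best kp => if pvStartsAt fl kp.1 i then min best kp.2 else best)
          (([("pin", (2:Int)), ("pressure", 2), ("hardware", 2), ("arduino", 2)]).foldl
            (fun best kp => if pvStartsAt fl kp.1 i then min best kp.2 else best)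
            (([("error", (1:Int)), ("emergency", 1), ("safety", 1), ("mill_lamp", 1), ("system_test", 1)]).foldl
              (fun best kp => if pvStartsAt fl kp.1 i then min best kp.2 else best) b)) := rfl
  rw [e, pv_chain1 fl i b hb, pv_chain2 fl i _ hb1, pv_chain3 fl i _ hb2]
  exact pv_merge3 _ _ _ b hb

-- folding one more position into the 'any so far' characterization
theorem pv_stepO (d1 d2 d3 a1 a2 a3 : Bool) (b : Int) (hb : pvOk b) :
    pvForm a1 a2 a3 (pvForm d1 d2 d3 b)
      = pvForm (d1 || a1) (d2 || a2) (d3 || a3) b := by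
  rcases hb with rfl | rfl | rfl | rfl <;> cases d1 <;> cases d2 <;> cases d3 <;>
  cases a1 <;> cases a2 <;> cases a3 <;> decide

-- the outer fold over any index list, characterized by the three 'any' booleans
theorem pv_outer_eq (fl : String) : ∀ (is : List Int) (b : Int), pvOk b →
    is.foldl (fun best i =>
      pvPatterns.foldl (fun best kp => if pvStartsAt fl kp.1 i then min best kp.2 else best) best) b
      = pvForm (is.any (pvD1 fl)) (is.any (pvD2 fl)) (is.any (pvD3 fl)) b := by
  intro is
  induction is with
  | nil => intro b hb; simp [pvForm]
  | cons i t ih =>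
    intro b hb
    rw [List.foldl_cons, List.any_cons, List.any_cons, List.any_cons]
    show List.foldl _ (pvPatterns.foldl
        (fun best kp => if pvStartsAt fl kp.1 i then min best kp.2 else best) b) t = _
    rw [pv_inner_eq fl i b hb, ih _ (pvForm_ok _ _ _ b hb), pv_stepO _ _ _ _ _ _ b hb]

-- any distributes over pointwise || (used to split a tier condition into per-keyword scans)
theorem pv_any_or {α : Type} (f g : α → Bool) : ∀ (l : List α),
    l.any (fun x => f x || g x) = (l.any f || l.any g) := by
  intro l
  induction l with
  | nil => rfl
  | cons a t ih => simp [List.any_cons, ih, Bool.or_assoc, Bool.or_left_comm]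

-- 'kw starts at some scanned position' ⟺ 'kw in fl', for nonempty kw
theorem pv_any_startsAt (fl : String) (kw : String) (hk : kw.toList ≠ []) :
    (PySem.List.pyRange 0 (PySem.Str.len fl) 1).any (pvStartsAt fl kw)
      = PySem.Str.isIn kw fl := by
  rcases h : PySem.Str.isIn kw fl with _ | _
  · -- kw not in fl: no position matches
    rw [List.any_eq_false]
    intro i hi
    simp only [pvStartsAt, Bool.not_eq_true]
    rcases hs : PySem.Chars.startswith (fl.toList.drop i.toNat) kw.toList with _ | _
    · rfl
    · exfalso
      have hpre : kw.toList <+: fl.toList.drop i.toNat := (PySem.Chars.startswith_iff _ _).mp hs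
      have : PySem.Chars.isIn kw.toList fl.toList = true :=
        (PySem.Chars.exists_prefix_drop_iff_isIn kw.toList fl.toList).mp ⟨i.toNat, hpre⟩
      have h2 : PySem.Str.isIn kw fl = true := by
        rw [PySem.Str.isIn_iff_infix]
        exact (PySem.Chars.isIn_iff_infix _ _).mp this
      rw [h] at h2; exact Bool.false_ne_true h2
  · -- kw in fl: some position j < len fl matches
    rw [List.any_eq_true]
    have hinf : kw.toList <:+: fl.toList := (PySem.Str.isIn_iff_infix _ _).mp h
    have hin : PySem.Chars.isIn kw.toList fl.toList = true := (PySem.Chars.isIn_iff_infix _ _).mpr hinf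
    obtain ⟨j, hj⟩ := (PySem.Chars.exists_prefix_drop_iff_isIn kw.toList fl.toList).mpr hin
    have hjlt : j < fl.toList.length := by
      by_contra hge
      push_neg at hge
      rw [List.drop_eq_nil_of_le hge] at hj
      exact hk (List.prefix_nil.mp hj)
    refine ⟨(j : Int), ?_, ?_⟩
    · rw [PySem.List.mem_pyRange_one]
      constructor
      · exact Int.natCast_nonneg j
      · rw [PySem.Str.len_eq]; exact_mod_cast hjlt
    · simp only [pvStartsAt, Int.toNat_natCast]
      exact (PySem.Chars.startswith_iff _ _).mpr hj

-- a tier's 'any over positions' equals the tier's 'any isIn' of A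
theorem pv_tier1_eq (fl : String) :
    (PySem.List.pyRange 0 (PySem.Str.len fl) 1).any (pvD1 fl)
      = (["error", "emergency", "safety", "mill_lamp", "system_test"].any
          (fun kw => PySem.Str.isIn kw fl)) := by
  have h : pvD1 fl = fun i => pvStartsAt fl "error" i ||
      (fun i => pvStartsAt fl "emergency" i ||
      (fun i => pvStartsAt fl "safety" i ||
      (fun i => pvStartsAt fl "mill_lamp" i || pvStartsAt fl "system_test" i) i) i) i := by
    funext i; simp only [pvD1, Bool.or_assoc]
  rw [h, pv_any_or, pv_any_or, pv_any_or, pv_any_or,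
      pv_any_startsAt fl "error" (by decide), pv_any_startsAt fl "emergency" (by decide),
      pv_any_startsAt fl "safety" (by decide), pv_any_startsAt fl "mill_lamp" (by decide),
      pv_any_startsAt fl "system_test" (by decide)]
  simp only [List.any_cons, List.any_nil, Bool.or_false, Bool.or_assoc]

theorem pv_tier2_eq (fl : String) :
    (PySem.List.pyRange 0 (PySem.Str.len fl) 1).any (pvD2 fl)
      = (["pin", "pressure", "hardware", "arduino"].any
          (fun kw => PySem.Str.isIn kw fl)) := by
  have h : pvD2 fl = fun i => pvStartsAt fl "pin" i ||
      (fun i => pvStartsAt fl "pressure" i ||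
      (fun i => pvStartsAt fl "hardware" i || pvStartsAt fl "arduino" i) i) i := by
    funext i; simp only [pvD2, Bool.or_assoc]
  rw [h, pv_any_or, pv_any_or, pv_any_or,
      pv_any_startsAt fl "pin" (by decide), pv_any_startsAt fl "pressure" (by decide),
      pv_any_startsAt fl "hardware" (by decide), pv_any_startsAt fl "arduino" (by decide)]
  simp only [List.any_cons, List.any_nil, Bool.or_false, Bool.or_assoc]

theorem pv_tier3_eq (fl : String) :
    (PySem.List.pyRange 0 (PySem.Str.len fl) 1).any (pvD3 fl)
      = (["setup", "command", "deploy"].any (fun kw => PySem.Str.isIn kw fl)) := by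
  have h : pvD3 fl = fun i => pvStartsAt fl "setup" i ||
      (fun i => pvStartsAt fl "command" i || pvStartsAt fl "deploy" i) i := by
    funext i; simp only [pvD3, Bool.or_assoc]
  rw [h, pv_any_or, pv_any_or,
      pv_any_startsAt fl "setup" (by decide), pv_any_startsAt fl "command" (by decide),
      pv_any_startsAt fl "deploy" (by decide)]
  simp only [List.any_cons, List.any_nil, Bool.or_false, Bool.or_assoc]

-- the final if-chain comparison, fully boolean
theorem pv_final (c1 c2 c3 : Bool) :
    (if c1 then (1:Int) else if c2 then 2 else if c3 then 3 else 4)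
      = if c1 then min 4 1 else if c2 then min 4 2 else if c3 then min 4 3 else 4 := by
  cases c1 <;> cases c2 <;> cases c3 <;> decide

-- ===== VERDICT (by name: the statement is the Claim_ definition above) =====
theorem get_document_priority_py_spec : Claim_equal_get_document_priority_py := by
  intro filename content _
  show get_document_priority_py filename content = get_document_priority_py_alt filename content
  have hB : get_document_priority_py_alt filename content
      = pvForm
          ((PySem.List.pyRange 0 (PySem.Str.len (PySem.Str.lower filename)) 1).any
            (pvD1 (PySem.Str.lower filename)))
          ((PySem.List.pyRange 0 (PySem.Str.len (PySem.Str.lower filename)) 1).any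
            (pvD2 (PySem.Str.lower filename)))
          ((PySem.List.pyRange 0 (PySem.Str.len (PySem.Str.lower filename)) 1).any
            (pvD3 (PySem.Str.lower filename)))
          4 :=
    pv_outer_eq (PySem.Str.lower filename)
      (PySem.List.pyRange 0 (PySem.Str.len (PySem.Str.lower filename)) 1) 4
      (Or.inr (Or.inr (Or.inr rfl)))
  rw [hB, pv_tier1_eq, pv_tier2_eq, pv_tier3_eq]
  show (if (["error", "emergency", "safety", "mill_lamp", "system_test"].any
        (fun kw => PySem.Str.isIn kw (PySem.Str.lower filename))) then (1:Int)
      else if (["pin", "pressure", "hardware", "arduino"].any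
        (fun kw => PySem.Str.isIn kw (PySem.Str.lower filename))) then 2
      else if (["setup", "command", "deploy"].any
        (fun kw => PySem.Str.isIn kw (PySem.Str.lower filename))) then 3
      else 4) = _
  unfold pvForm
  exact pv_final _ _ _
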